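-- pv_equiv track=rewrite | github.com/shinkeonkim/BOJ | 11000~11999/11600~11699/11611.py | transform
-- ===== SOURCE A (Python) =====
-- def transform(l, n, m):
--   ret = [[0] * m for _ in range(n)]
--
--   dy = [0, 0, 0, 1, -1, 1, 1, -1, -1]
--   dx = [0, 1, -1, 0, 0, 1, -1, 1, -1]
--   for i in range(n):
--     for j in range(m):
--       for d in range(len(dy)):
--         ny = (i + dy[d] + n) % n
--         nx = (j + dx[d] + m) % m
--
--         ret[i][j] += l[ny][nx]
--   return ret
-- ===== SOURCE B (Python) =====
-- def transform(l, n, m):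
--     # Separable two-stage toroidal sum: horizontal 3-sum per row, then vertical 3-sum.
--     row = [[l[i][(j - 1) % m] + l[i][j] + l[i][(j + 1) % m] for j in range(m)]
--            for i in range(n)]
--     return [[row[(i - 1) % n][j] + row[i][j] + row[(i + 1) % n][j] for j in range(m)]
--             for i in range(n)]
-- ===== Notes on version B (the rewrite author's own statement) =====
-- stated objective: alternative
-- what changed: Replaces A's per-cell 9-offset inner loop by a separable two-pass scheme: a first pass materialises the horizontal toroidal 3-sum of each row into an intermediate table, a second pass takes the vertical toroidal 3-sum of that table (6 additions per cell instead of 9, no offset tables).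
import Mathlib
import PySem

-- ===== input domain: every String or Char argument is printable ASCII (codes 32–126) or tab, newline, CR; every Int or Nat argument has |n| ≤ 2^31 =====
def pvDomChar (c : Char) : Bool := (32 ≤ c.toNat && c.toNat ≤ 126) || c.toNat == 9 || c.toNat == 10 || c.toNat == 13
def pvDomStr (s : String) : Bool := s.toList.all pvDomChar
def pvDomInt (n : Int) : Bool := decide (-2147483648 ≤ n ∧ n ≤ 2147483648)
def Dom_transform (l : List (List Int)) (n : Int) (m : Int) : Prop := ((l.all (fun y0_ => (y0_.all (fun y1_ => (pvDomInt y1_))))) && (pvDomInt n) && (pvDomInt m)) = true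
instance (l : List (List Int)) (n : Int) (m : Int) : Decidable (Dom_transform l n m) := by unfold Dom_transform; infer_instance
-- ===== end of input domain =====

-- B replaces A's per-cell 9-offset inner loop by a separable two-pass scheme
-- (horizontal toroidal 3-sums first, then vertical 3-sums of that table):
-- a different decomposition with fewer additions per cell and no offset tables.

-- ===== PORT A =====
def transform (l : List (List Int)) (n : Int) (m : Int) : List (List Int) :=
  let ret : List (List Int) := List.replicate n.toNat (List.replicate m.toNat 0)
  let dy : List Int := [0, 0, 0, 1, -1, 1, 1, -1, -1]
  let dx : List Int := [0, 1, -1, 0, 0, 1, -1, 1, -1]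
  (PySem.List.pyRange 0 n 1).foldl (fun ret i =>
    (PySem.List.pyRange 0 m 1).foldl (fun ret j =>
      (PySem.List.pyRange 0 (dy.length : Int) 1).foldl (fun ret d =>
        let ny := PySem.Int.mod (i + PySem.List.pyGetD dy d 0 + n) n
        let nx := PySem.Int.mod (j + PySem.List.pyGetD dx d 0 + m) m
        ret.modify i.toNat (fun r =>
          r.modify j.toNat (fun x =>
            x + PySem.List.pyGetD (PySem.List.pyGetD l ny []) nx 0))) ret) ret) ret

-- ===== PORT B =====
def transform_alt (l : List (List Int)) (n : Int) (m : Int) : List (List Int) :=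
  let row : List (List Int) := (PySem.List.pyRange 0 n 1).map (fun i =>
    (PySem.List.pyRange 0 m 1).map (fun j =>
      PySem.List.pyGetD (PySem.List.pyGetD l i []) (PySem.Int.mod (j - 1) m) 0
      + PySem.List.pyGetD (PySem.List.pyGetD l i []) j 0
      + PySem.List.pyGetD (PySem.List.pyGetD l i []) (PySem.Int.mod (j + 1) m) 0))
  (PySem.List.pyRange 0 n 1).map (fun i =>
    (PySem.List.pyRange 0 m 1).map (fun j =>
      PySem.List.pyGetD (PySem.List.pyGetD row (PySem.Int.mod (i - 1) n) []) j 0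
      + PySem.List.pyGetD (PySem.List.pyGetD row i []) j 0
      + PySem.List.pyGetD (PySem.List.pyGetD row (PySem.Int.mod (i + 1) n) []) j 0))

-- ===== PRECONDITION & SPEC =====
-- Pre_ excludes exactly the inputs on which A raises IndexError: when both loops
-- run (0 < n and 0 < m), l must supply at least n rows whose first n rows each
-- have at least m entries; otherwise l[ny] or l[ny][nx] is out of range.
def Pre_transform (l : List (List Int)) (n : Int) (m : Int) : Prop :=
  0 < n → 0 < m → (n ≤ (l.length : Int) ∧ ∀ row ∈ l.take n.toNat, m ≤ (row.length : Int))
instance (l : List (List Int)) (n : Int) (m : Int) : Decidable (Pre_transform l n m) := by unfold Pre_transform; infer_instance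

def pvWitness_transform : List (List Int) × Int × Int := ([[1, 2], [3, 4]], 2, 2)

def Spec_transform (l : List (List Int)) (n : Int) (m : Int) (out : List (List Int)) : Prop := out = transform_alt l n m
instance (l : List (List Int)) (n : Int) (m : Int) (out : List (List Int)) : Decidable (Spec_transform l n m out) := by unfold Spec_transform; infer_instance

-- ===== CLAIM (what is proved, stated in full; the proofs are below) =====
def Claim_equal_transform : Prop := ∀ (l : List (List Int)) (n : Int) (m : Int), Dom_transform l n m → Pre_transform l n m → Spec_transform l n m (transform l n m)

-- ===== LEMMAS AND PROOFS =====

-- Folding modifications that all hit the SAME index collapses to one modify.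
theorem foldl_modify_same {α β : Type} (xs : List β) (i : Nat) (f : β → α → α) :
    ∀ (a : List α), xs.foldl (fun a x => a.modify i (f x)) a
      = a.modify i (fun r => xs.foldl (fun r x => f x r) r) := by
  induction xs with
  | nil =>
    intro a
    apply List.ext_getElem (by simp [List.length_modify])
    intro t h1 h2
    simp only [List.foldl_nil, List.getElem_modify]
    split <;> rfl
  | cons x xs ih =>
    intro a
    simp only [List.foldl_cons]
    rw [ih]
    apply List.ext_getElem (by simp [List.length_modify])
    intro t h1 h2
    simp only [List.getElem_modify]
    split <;> rfl

-- Folding modify over range k, each iteration touching its own index.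
theorem foldl_modify_range {α : Type} (f : Nat → α → α) :
    ∀ (k : Nat) (a : List α), (List.range k).foldl (fun a i => a.modify i (f i)) a
      = a.mapIdx (fun t x => if t < k then f t x else x) := by
  intro k
  induction k with
  | zero =>
    intro a
    apply List.ext_getElem (by simp)
    intro t h1 h2
    simp
  | succ k ih =>
    intro a
    rw [List.range_succ, List.foldl_append, ih]
    apply List.ext_getElem (by simp [List.length_modify])
    intro t h1 h2
    simp only [List.foldl_cons, List.foldl_nil, List.getElem_modify, List.getElem_mapIdx]
    by_cases hk : k = t
    · subst hk; simp
    · simp only [hk, if_false]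
      by_cases h3 : t < k
      · simp [h3, Nat.lt_succ_of_lt h3]
      · have h4 : ¬ t < k + 1 := by omega
        simp [h3, h4]

theorem transform_spec_aux : ∀ (l : List (List Int)) (n : Int) (m : Int),
    Pre_transform l n m → transform l n m = transform_alt l n m := by
  intro l n m hpre
  rcases lt_or_ge 0 n with hn | hn
  case inr =>
    have hnnil : PySem.List.pyRange 0 n 1 = [] := PySem.List.pyRange_one_eq_nil (by omega)
    have hn0 : n.toNat = 0 := by omega
    simp [transform, transform_alt, hnnil, hn0]
  rcases lt_or_ge 0 m with hm | hm
  case inr =>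
    have hmnil : PySem.List.pyRange 0 m 1 = [] := PySem.List.pyRange_one_eq_nil (by omega)
    have hm0 : m.toNat = 0 := by omega
    simp [transform, transform_alt, hmnil, hm0, PySem.List.pyRange_one,
      List.map_map, Function.comp_def, List.map_const']
  obtain ⟨hlen, hrows⟩ := hpre hn hm
  unfold transform transform_alt
  simp only [foldl_modify_same]
  have h9 : PySem.List.pyRange 0 ((([0, 0, 0, 1, -1, 1, 1, -1, -1]:List Int)).length : Int) 1
      = [0, 1, 2, 3, 4, 5, 6, 7, 8] := by decide
  simp only [h9, List.foldl_cons, List.foldl_nil]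
  simp only [show PySem.List.pyGetD ([0, 0, 0, 1, -1, 1, 1, -1, -1]:List Int) 0 0 = (0) from by decide,
    show PySem.List.pyGetD ([0, 1, -1, 0, 0, 1, -1, 1, -1]:List Int) 0 0 = (0) from by decide,
    show PySem.List.pyGetD ([0, 0, 0, 1, -1, 1, 1, -1, -1]:List Int) 1 0 = (0) from by decide,
    show PySem.List.pyGetD ([0, 1, -1, 0, 0, 1, -1, 1, -1]:List Int) 1 0 = (1) from by decide,
    show PySem.List.pyGetD ([0, 0, 0, 1, -1, 1, 1, -1, -1]:List Int) 2 0 = (0) from by decide,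
    show PySem.List.pyGetD ([0, 1, -1, 0, 0, 1, -1, 1, -1]:List Int) 2 0 = (-1) from by decide,
    show PySem.List.pyGetD ([0, 0, 0, 1, -1, 1, 1, -1, -1]:List Int) 3 0 = (1) from by decide,
    show PySem.List.pyGetD ([0, 1, -1, 0, 0, 1, -1, 1, -1]:List Int) 3 0 = (0) from by decide,
    show PySem.List.pyGetD ([0, 0, 0, 1, -1, 1, 1, -1, -1]:List Int) 4 0 = (-1) from by decide,
    show PySem.List.pyGetD ([0, 1, -1, 0, 0, 1, -1, 1, -1]:List Int) 4 0 = (0) from by decide,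
    show PySem.List.pyGetD ([0, 0, 0, 1, -1, 1, 1, -1, -1]:List Int) 5 0 = (1) from by decide,
    show PySem.List.pyGetD ([0, 1, -1, 0, 0, 1, -1, 1, -1]:List Int) 5 0 = (1) from by decide,
    show PySem.List.pyGetD ([0, 0, 0, 1, -1, 1, 1, -1, -1]:List Int) 6 0 = (1) from by decide,
    show PySem.List.pyGetD ([0, 1, -1, 0, 0, 1, -1, 1, -1]:List Int) 6 0 = (-1) from by decide,
    show PySem.List.pyGetD ([0, 0, 0, 1, -1, 1, 1, -1, -1]:List Int) 7 0 = (-1) from by decide,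
    show PySem.List.pyGetD ([0, 1, -1, 0, 0, 1, -1, 1, -1]:List Int) 7 0 = (1) from by decide,
    show PySem.List.pyGetD ([0, 0, 0, 1, -1, 1, 1, -1, -1]:List Int) 8 0 = (-1) from by decide,
    show PySem.List.pyGetD ([0, 1, -1, 0, 0, 1, -1, 1, -1]:List Int) 8 0 = (-1) from by decide]
  simp only [PySem.List.pyRange_one, List.foldl_map, List.map_map, Function.comp_def,
    zero_add, Int.toNat_natCast, sub_zero]
  simp only [foldl_modify_range]
  have hNn : (n.toNat : Int) = n := Int.toNat_of_nonneg (by omega)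
  have hMm : (m.toNat : Int) = m := Int.toNat_of_nonneg (by omega)
  have hrowexp : ∀ (g : Nat → List Int) (a : Int), 0 ≤ a → a < n →
      PySem.List.pyGetD (List.map g (List.range n.toNat)) a [] = g a.toNat := by
    intro g a h1 h2
    rw [PySem.List.pyGetD_of_nonneg _ _ h1,
      PySem.List.getD_map_range _ _ _ _ (by omega)]
  have hcolexp : ∀ (g : Nat → Int) (a : Int), 0 ≤ a → a < m →
      PySem.List.pyGetD (List.map g (List.range m.toNat)) a 0 = g a.toNat := by
    intro g a h1 h2
    rw [PySem.List.pyGetD_of_nonneg _ _ h1,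
      PySem.List.getD_map_range _ _ _ _ (by omega)]
  apply List.ext_getElem (by simp)
  intro i hi1 hi2
  have hiN : i < n.toNat := by simpa using hi1
  have hi0 : (0:Int) ≤ (i:Int) := by positivity
  have hin : ((i:Int)) < n := by omega
  simp only [List.getElem_mapIdx, List.getElem_map, List.getElem_range,
    List.getElem_replicate, hiN, if_true]
  apply List.ext_getElem (by simp)
  intro j hj1 hj2
  have hjM : j < m.toNat := by simp at hj1; omega
  have hj0 : (0:Int) ≤ (j:Int) := by positivity
  have hjm : ((j:Int)) < m := by omega
  simp only [List.getElem_mapIdx, List.getElem_map, List.getElem_range,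
    List.getElem_replicate, hjM, if_true]
  simp only [PySem.Int.mod_eq_emod_of_pos hn, PySem.Int.mod_eq_emod_of_pos hm]
  rw [hrowexp _ _ (Int.emod_nonneg _ (by omega)) (Int.emod_lt_of_pos _ hn),
    hrowexp _ _ hi0 hin,
    hrowexp _ _ (Int.emod_nonneg _ (by omega)) (Int.emod_lt_of_pos _ hn)]
  rw [hcolexp _ _ hj0 hjm, hcolexp _ _ hj0 hjm, hcolexp _ _ hj0 hjm]
  rw [Int.toNat_of_nonneg (Int.emod_nonneg ((i:Int) - 1) (by omega)),
    Int.toNat_of_nonneg (Int.emod_nonneg ((i:Int) + 1) (by omega))]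
  simp only [Int.toNat_natCast]
  simp only [add_zero, zero_add, ← sub_eq_add_neg, Int.add_emod_right,
    Int.emod_eq_of_lt hi0 hin, Int.emod_eq_of_lt hj0 hjm]
  ring

-- ===== VERDICT (by name: the statement is the Claim_ definition above) =====
theorem transform_spec : Claim_equal_transform := by
  intro l n m _ hpre
  exact transform_spec_aux l n m hpre
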